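-- pv_equiv track=rewrite | github.com/surfmaverick/valueApp | asset.py | monthlytoquarterly
-- ===== SOURCE A (Python) =====
-- def monthlytoquarterly(monthlies,firstquarterendingmonth=3):
--
--     results = {1:0,2:0,3:0,4:0}
--
--     for g,v in monthlies.items():
--         if (g < 1 + firstquarterendingmonth) and (g > 0 + firstquarterendingmonth - 3):
--             results[1] = results[1] + v
--
--         if (g < 4 + firstquarterendingmonth) and (g > 3 + firstquarterendingmonth - 3):
--             results[2] = results[2] + v
--
--         if (g < 7 + firstquarterendingmonth) and (g > 6 + firstquarterendingmonth - 3):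
--             results[3] = results[3] + v
--
--         if (g < 10 + firstquarterendingmonth) and (g > 9 + firstquarterendingmonth - 3):
--             results[4] = results[4] + v
--
--     return results
-- ===== SOURCE B (Python) =====
-- def monthlytoquarterly(monthlies, firstquarterendingmonth=3):
--     # Each quarter q has exclusive bounds derived from firstquarterendingmonth;
--     # sum each quarter with its own independent scan of the dict.
--     return {q: sum(v for g, v in monthlies.items()
--                    if firstquarterendingmonth + 3 * (q - 1) - 3 < g < firstquarterendingmonth + 3 * (q - 1) + 1)
--             for q in (1, 2, 3, 4)}
-- ===== Notes on version B (the rewrite author's own statement) =====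
-- stated objective: simpler
-- what changed: Replaced the single accumulating pass with four unrolled branch-ifs over a mutable 4-key dict by a dict comprehension that, for each quarter q in 1..4, computes its exclusive bounds from firstquarterendingmonth in closed form and sums the matching values in an independent scan.
import Mathlib
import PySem

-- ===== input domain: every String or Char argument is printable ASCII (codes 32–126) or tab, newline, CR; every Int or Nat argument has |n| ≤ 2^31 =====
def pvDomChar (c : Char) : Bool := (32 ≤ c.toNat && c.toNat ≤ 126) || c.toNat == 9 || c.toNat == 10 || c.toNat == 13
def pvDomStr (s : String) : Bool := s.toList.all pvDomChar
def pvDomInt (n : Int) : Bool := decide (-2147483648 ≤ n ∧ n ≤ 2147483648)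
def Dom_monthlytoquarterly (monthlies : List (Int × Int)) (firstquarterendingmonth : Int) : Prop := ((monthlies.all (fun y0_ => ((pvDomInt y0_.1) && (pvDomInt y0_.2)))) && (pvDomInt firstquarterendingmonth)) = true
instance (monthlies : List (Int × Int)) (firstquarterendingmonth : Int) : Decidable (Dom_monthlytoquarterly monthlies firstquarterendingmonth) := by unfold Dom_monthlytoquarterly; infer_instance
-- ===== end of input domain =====

-- B replaces A's single accumulating pass over a mutable 4-key dict by four independent
-- per-quarter scans, with each quarter's exclusive bounds computed in closed form (simpler decomposition).


-- ===== PORT A =====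
-- Python results[q] is read via getD (exact here: all four keys are present from initialisation on).
def monthlytoquarterly (monthlies : List (Int × Int)) (firstquarterendingmonth : Int) : List (Int × Int) :=
  let results : PySem.Dict Int Int := PySem.Dict.ofList [(1, 0), (2, 0), (3, 0), (4, 0)]
  (monthlies.foldl (fun results gv =>
    let g := gv.1
    let v := gv.2
    let results := if g < 1 + firstquarterendingmonth ∧ g > 0 + firstquarterendingmonth - 3 then
      results.insert 1 (results.getD 1 0 + v) else results
    let results := if g < 4 + firstquarterendingmonth ∧ g > 3 + firstquarterendingmonth - 3 then
      results.insert 2 (results.getD 2 0 + v) else results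
    let results := if g < 7 + firstquarterendingmonth ∧ g > 6 + firstquarterendingmonth - 3 then
      results.insert 3 (results.getD 3 0 + v) else results
    let results := if g < 10 + firstquarterendingmonth ∧ g > 9 + firstquarterendingmonth - 3 then
      results.insert 4 (results.getD 4 0 + v) else results
    results) results).items

-- ===== PORT B =====
-- sum(v for g, v in monthlies.items() if lo < g < hi) ported as a foldl from 0.
def monthlytoquarterly_alt (monthlies : List (Int × Int)) (firstquarterendingmonth : Int) : List (Int × Int) :=
  [1, 2, 3, 4].map (fun q =>
    (q, monthlies.foldl (fun acc gv =>
          if firstquarterendingmonth + 3 * (q - 1) - 3 < gv.1 ∧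
             gv.1 < firstquarterendingmonth + 3 * (q - 1) + 1 then acc + gv.2 else acc) 0))

-- ===== PRECONDITION & SPEC =====
def Spec_monthlytoquarterly (monthlies : List (Int × Int)) (firstquarterendingmonth : Int) (out : List (Int × Int)) : Prop := out = monthlytoquarterly_alt monthlies firstquarterendingmonth
instance (monthlies : List (Int × Int)) (firstquarterendingmonth : Int) (out : List (Int × Int)) : Decidable (Spec_monthlytoquarterly monthlies firstquarterendingmonth out) := by unfold Spec_monthlytoquarterly; infer_instance

-- ===== CLAIM (what is proved, stated in full; the proofs are below) =====
def Claim_equal_monthlytoquarterly : Prop := ∀ (monthlies : List (Int × Int)) (firstquarterendingmonth : Int), Dom_monthlytoquarterly monthlies firstquarterendingmonth → Spec_monthlytoquarterly monthlies firstquarterendingmonth (monthlytoquarterly monthlies firstquarterendingmonth)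

-- ===== LEMMAS AND PROOFS =====

-- B's per-quarter fold, with an arbitrary starting accumulator (proof helper; body = B's lambda).
def pvQSum (f q : Int) (acc : Int) (xs : List (Int × Int)) : Int :=
  xs.foldl (fun acc gv =>
    if f + 3 * (q - 1) - 3 < gv.1 ∧ gv.1 < f + 3 * (q - 1) + 1 then acc + gv.2 else acc) acc

-- A's loop body applied to one (g, v).
def pvStep (f : Int) (results : PySem.Dict Int Int) (gv : Int × Int) : PySem.Dict Int Int :=
  let g := gv.1
  let v := gv.2
  let results := if g < 1 + f ∧ g > 0 + f - 3 then results.insert 1 (results.getD 1 0 + v) else results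
  let results := if g < 4 + f ∧ g > 3 + f - 3 then results.insert 2 (results.getD 2 0 + v) else results
  let results := if g < 7 + f ∧ g > 6 + f - 3 then results.insert 3 (results.getD 3 0 + v) else results
  let results := if g < 10 + f ∧ g > 9 + f - 3 then results.insert 4 (results.getD 4 0 + v) else results
  results


lemma pvStage1 (P : Prop) [Decidable P] (a b c d v : Int) :
    (if P then (⟨[(1, a), (2, b), (3, c), (4, d)]⟩ : PySem.Dict Int Int).insert 1
        ((⟨[(1, a), (2, b), (3, c), (4, d)]⟩ : PySem.Dict Int Int).getD 1 0 + v) else (⟨[(1, a), (2, b), (3, c), (4, d)]⟩ : PySem.Dict Int Int))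
    = (⟨[(1, if P then a + v else a), (2, b), (3, c), (4, d)]⟩ : PySem.Dict Int Int) := by
  split_ifs <;>
    simp [PySem.Dict.insert, PySem.Dict.getD, PySem.Dict.get?, PySem.Dict.contains]

lemma pvStage2 (P : Prop) [Decidable P] (a b c d v : Int) :
    (if P then (⟨[(1, a), (2, b), (3, c), (4, d)]⟩ : PySem.Dict Int Int).insert 2
        ((⟨[(1, a), (2, b), (3, c), (4, d)]⟩ : PySem.Dict Int Int).getD 2 0 + v) else (⟨[(1, a), (2, b), (3, c), (4, d)]⟩ : PySem.Dict Int Int))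
    = (⟨[(1, a), (2, if P then b + v else b), (3, c), (4, d)]⟩ : PySem.Dict Int Int) := by
  split_ifs <;>
    simp [PySem.Dict.insert, PySem.Dict.getD, PySem.Dict.get?, PySem.Dict.contains]

lemma pvStage3 (P : Prop) [Decidable P] (a b c d v : Int) :
    (if P then (⟨[(1, a), (2, b), (3, c), (4, d)]⟩ : PySem.Dict Int Int).insert 3
        ((⟨[(1, a), (2, b), (3, c), (4, d)]⟩ : PySem.Dict Int Int).getD 3 0 + v) else (⟨[(1, a), (2, b), (3, c), (4, d)]⟩ : PySem.Dict Int Int))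
    = (⟨[(1, a), (2, b), (3, if P then c + v else c), (4, d)]⟩ : PySem.Dict Int Int) := by
  split_ifs <;>
    simp [PySem.Dict.insert, PySem.Dict.getD, PySem.Dict.get?, PySem.Dict.contains]

lemma pvStage4 (P : Prop) [Decidable P] (a b c d v : Int) :
    (if P then (⟨[(1, a), (2, b), (3, c), (4, d)]⟩ : PySem.Dict Int Int).insert 4
        ((⟨[(1, a), (2, b), (3, c), (4, d)]⟩ : PySem.Dict Int Int).getD 4 0 + v) else (⟨[(1, a), (2, b), (3, c), (4, d)]⟩ : PySem.Dict Int Int))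
    = (⟨[(1, a), (2, b), (3, c), (4, if P then d + v else d)]⟩ : PySem.Dict Int Int) := by
  split_ifs <;>
    simp [PySem.Dict.insert, PySem.Dict.getD, PySem.Dict.get?, PySem.Dict.contains]

lemma pvStep_shape (f g v a b c d : Int) :
    pvStep f ⟨[(1, a), (2, b), (3, c), (4, d)]⟩ (g, v)
    = ⟨[(1, if f + 3 * (1 - 1) - 3 < g ∧ g < f + 3 * (1 - 1) + 1 then a + v else a),
        (2, if f + 3 * (2 - 1) - 3 < g ∧ g < f + 3 * (2 - 1) + 1 then b + v else b),
        (3, if f + 3 * (3 - 1) - 3 < g ∧ g < f + 3 * (3 - 1) + 1 then c + v else c),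
        (4, if f + 3 * (4 - 1) - 3 < g ∧ g < f + 3 * (4 - 1) + 1 then d + v else d)]⟩ := by
  have e1 : (g < 1 + f ∧ g > 0 + f - 3) = (f + 3 * (1 - 1 : Int) - 3 < g ∧ g < f + 3 * (1 - 1) + 1) := propext (by omega)
  have e2 : (g < 4 + f ∧ g > 3 + f - 3) = (f + 3 * (2 - 1 : Int) - 3 < g ∧ g < f + 3 * (2 - 1) + 1) := propext (by omega)
  have e3 : (g < 7 + f ∧ g > 6 + f - 3) = (f + 3 * (3 - 1 : Int) - 3 < g ∧ g < f + 3 * (3 - 1) + 1) := propext (by omega)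
  have e4 : (g < 10 + f ∧ g > 9 + f - 3) = (f + 3 * (4 - 1 : Int) - 3 < g ∧ g < f + 3 * (4 - 1) + 1) := propext (by omega)
  simp only [pvStep]
  rw [pvStage1, pvStage2, pvStage3, pvStage4]
  simp only [e1, e2, e3, e4]

lemma pvLoop (f : Int) (xs : List (Int × Int)) : ∀ (a b c d : Int),
    ((xs.foldl (pvStep f) ⟨[(1, a), (2, b), (3, c), (4, d)]⟩) : PySem.Dict Int Int).items
    = [(1, pvQSum f 1 a xs), (2, pvQSum f 2 b xs), (3, pvQSum f 3 c xs), (4, pvQSum f 4 d xs)] := by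
  induction xs with
  | nil => intro a b c d; simp [pvQSum]
  | cons gv rest ih =>
    intro a b c d
    rw [List.foldl_cons, show gv = (gv.1, gv.2) from rfl, pvStep_shape, ih]
    simp [pvQSum]

-- ===== VERDICT (by name: the statement is the Claim_ definition above) =====
theorem monthlytoquarterly_spec : Claim_equal_monthlytoquarterly := by
  intro monthlies f _
  unfold Spec_monthlytoquarterly monthlytoquarterly monthlytoquarterly_alt
  have hof : (PySem.Dict.ofList [(1, 0), (2, 0), (3, 0), (4, 0)] : PySem.Dict Int Int)
      = ⟨[(1, 0), (2, 0), (3, 0), (4, 0)]⟩ := by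
    simp [PySem.Dict.ofList, PySem.Dict.update, PySem.Dict.insert, PySem.Dict.empty,
      PySem.Dict.contains]
  have hstep : (fun (results : PySem.Dict Int Int) (gv : Int × Int) =>
      let g := gv.1
      let v := gv.2
      let results := if g < 1 + f ∧ g > 0 + f - 3 then results.insert 1 (results.getD 1 0 + v) else results
      let results := if g < 4 + f ∧ g > 3 + f - 3 then results.insert 2 (results.getD 2 0 + v) else results
      let results := if g < 7 + f ∧ g > 6 + f - 3 then results.insert 3 (results.getD 3 0 + v) else results
      let results := if g < 10 + f ∧ g > 9 + f - 3 then results.insert 4 (results.getD 4 0 + v) else results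
      results) = pvStep f := rfl
  simp only [hof, hstep, pvLoop f monthlies 0 0 0 0]
  simp [pvQSum]
  exact ⟨rfl, rfl⟩
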